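-- pv_equiv track=rewrite | github.com/Amirshox/ProblemSolving | binarysearch.com/Flip-to-Zeros.py | solve
-- ===== SOURCE A (Python) =====
-- def solve(nums):
--     count = 0
--     flipping = False
--     for i in range(len(nums)):
--         if nums[i] == 1:
--             flipping = True
--         if flipping and (i == 0 or nums[i] != nums[i - 1]):
--             count += 1
--     return count
-- ===== SOURCE B (Python) =====
-- def solve(nums):
--     # Phase 1: run-length-compress the list (one representative per maximal run).
--     comp = []
--     for x in nums:
--         if not comp or comp[-1] != x:
--             comp.append(x)
--     # Phase 2: answer = number of runs from the first run of 1s onward.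
--     if 1 not in comp:
--         return 0
--     return len(comp) - comp.index(1)
-- ===== Notes on version B (the rewrite author's own statement) =====
-- stated objective: alternative
-- what changed: Replaces A's single stateful transition-counting scan (flipping flag + nums[i-1] comparison) by building an explicit run-length-compressed list first and then computing the answer arithmetically as len(comp) - comp.index(1): no transition counter and no flag, the answer phase is index arithmetic on a new data structure.
import Mathlib
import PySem

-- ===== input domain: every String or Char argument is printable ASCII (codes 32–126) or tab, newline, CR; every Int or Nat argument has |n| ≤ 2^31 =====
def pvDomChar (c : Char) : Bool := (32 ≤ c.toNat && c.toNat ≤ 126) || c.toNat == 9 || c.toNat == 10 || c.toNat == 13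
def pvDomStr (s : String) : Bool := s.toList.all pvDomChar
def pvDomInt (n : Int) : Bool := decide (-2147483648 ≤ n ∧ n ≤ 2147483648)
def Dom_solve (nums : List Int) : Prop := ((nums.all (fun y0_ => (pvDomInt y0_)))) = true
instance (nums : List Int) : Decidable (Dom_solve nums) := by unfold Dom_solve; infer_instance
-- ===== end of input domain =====

-- B replaces A's stateful transition-counting scan by building an explicit run-length-compressed
-- list and reading the answer off as len(comp) - comp.index(1); same asymptotic cost, different structure.

-- ===== PORT A =====
-- loop body of A: updates (count, flipping) at index i
def stepA (nums : List Int) (st : Int × Bool) (i : Int) : Int × Bool :=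
  let flipping := if PySem.List.pyGetD nums i 0 = 1 then true else st.2
  let count := if flipping = true ∧ (i = 0 ∨ PySem.List.pyGetD nums i 0 ≠ PySem.List.pyGetD nums (i - 1) 0)
               then st.1 + 1 else st.1
  (count, flipping)

def solve (nums : List Int) : Int :=
  ((PySem.List.pyRange 0 nums.length 1).foldl (stepA nums) (0, false)).1

-- ===== PORT B =====
-- loop body of B: run-length compression; comp[-1] is only read when comp ≠ [] (Python's
-- short-circuit `not comp or comp[-1] != x`), so the default of pyGetD is never used.
def stepB (comp : List Int) (x : Int) : List Int :=
  if comp = [] ∨ PySem.List.pyGetD comp (-1) 0 ≠ x then comp ++ [x] else comp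

def solve_alt (nums : List Int) : Int :=
  let comp := nums.foldl stepB []
  if (1 : Int) ∈ comp then
    (comp.length : Int) - (((PySem.List.index? comp 1).getD 0 : Nat) : Int)
  else 0

-- ===== PRECONDITION & SPEC =====
def Spec_solve (nums : List Int) (out : Int) : Prop := out = solve_alt nums
instance (nums : List Int) (out : Int) : Decidable (Spec_solve nums out) := by unfold Spec_solve; infer_instance

-- ===== CLAIM (what is proved, stated in full; the proofs are below) =====
def Claim_equal_solve : Prop := ∀ (nums : List Int), Dom_solve nums → Spec_solve nums (solve nums)

-- ===== LEMMAS AND PROOFS =====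

-- structural form of A's loop: prev = previous element, fl = flipping flag, c = count
def loopA : List Int → Int → Bool → Int → Int
  | [], _, _, c => c
  | x :: xs, prev, fl, c =>
    let f := if x = 1 then true else fl
    let c' := if f = true ∧ x ≠ prev then c + 1 else c
    loopA xs x f c'

-- number of adjacent unequal pairs
def transCnt : List Int → Int
  | a :: b :: rest => (if a ≠ b then 1 else 0) + transCnt (b :: rest)
  | _ => 0

-- the common normal form both ports are reduced to
def normForm (nums : List Int) : Int :=
  match PySem.List.index? nums 1 with
  | none => 0
  | some j => 1 + transCnt (nums.drop j)

theorem loopA_true (xs : List Int) : ∀ (prev c : Int),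
    loopA xs prev true c = c + transCnt (prev :: xs) := by
  induction xs with
  | nil => intro prev c; simp [loopA, transCnt]
  | cons x xs ih =>
    intro prev c
    simp only [loopA, ite_self, true_and]
    rw [ih]
    simp only [transCnt]
    by_cases h : x = prev
    · simp [h]
    · rw [if_pos h, if_pos (fun hc : prev = x => h hc.symm)]; ring

theorem loopA_false (xs : List Int) : ∀ (prev c : Int), prev ≠ 1 →
    loopA xs prev false c =
      match PySem.List.index? xs 1 with
      | none => c
      | some j => c + 1 + transCnt (xs.drop j) := by
  induction xs with
  | nil => intro prev c _; simp [loopA, PySem.List.index?]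
  | cons x xs ih =>
    intro prev c hprev
    by_cases hx : x = 1
    · subst hx
      rw [PySem.List.index?_cons_self]
      simp only [loopA]
      rw [if_pos trivial, if_pos (⟨rfl, Ne.symm hprev⟩ : true = true ∧ (1:Int) ≠ prev), loopA_true]
      simp
    · rw [PySem.List.index?_cons_of_ne xs hx]
      simp only [loopA]
      rw [if_neg hx, if_neg (by simp : ¬ (false = true ∧ x ≠ prev)), ih x c hx]
      cases PySem.List.index? xs 1 with
      | none => simp
      | some j => simp

-- the fold from index pre'.length+1 on nums = pre' ++ [x] ++ xs equals the structural loop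
theorem fold_eq_loopA (nums : List Int) : ∀ (xs pre' : List Int) (x : Int) (c : Int) (fl : Bool),
    nums = pre' ++ [x] ++ xs →
    ((PySem.List.pyRange ((pre'.length : Int) + 1) nums.length 1).foldl (stepA nums) (c, fl)).1
      = loopA xs x fl c := by
  intro xs
  induction xs with
  | nil =>
    intro pre' x c fl hn
    have hlen : (nums.length : Int) = (pre'.length : Int) + 1 := by
      subst hn; simp
    rw [hlen, PySem.List.pyRange_one_eq_nil (le_refl _)]
    simp [loopA]
  | cons y ys ih =>
    intro pre' x c fl hn
    have hlen : (nums.length : Int) = (pre'.length : Int) + 1 + 1 + ys.length := by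
      subst hn; simp; omega
    have hlt : (pre'.length : Int) + 1 < nums.length := by
      rw [hlen]; omega
    rw [PySem.List.pyRange_one_cons hlt]
    simp only [List.foldl_cons]
    have hgety : PySem.List.pyGetD nums ((pre'.length : Int) + 1) 0 = y := by
      have h1 : ((pre'.length : Int) + 1) = ((pre'.length + 1 : Nat) : Int) := by push_cast; ring
      rw [h1, PySem.List.pyGetD_natCast]
      subst hn
      rw [List.getD_eq_getElem?_getD]
      rw [List.getElem?_append_right (by simp)]
      simp
    have hgetx : PySem.List.pyGetD nums ((pre'.length : Int) + 1 - 1) 0 = x := by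
      have h1 : ((pre'.length : Int) + 1 - 1) = ((pre'.length : Nat) : Int) := by ring
      rw [h1, PySem.List.pyGetD_natCast]
      subst hn
      rw [List.getD_eq_getElem?_getD, List.append_assoc,
          List.getElem?_append_right (le_refl _)]
      simp
    have hne0 : ¬ ((pre'.length : Int) + 1 = 0) := by omega
    have hstep : stepA nums (c, fl) ((pre'.length : Int) + 1)
        = (if (if y = 1 then true else fl) = true ∧ y ≠ x then c + 1 else c,
           if y = 1 then true else fl) := by
      simp only [stepA, hgety, hgetx]
      simp [hne0]
    rw [hstep]
    have hpre2 : nums = (pre' ++ [x]) ++ [y] ++ ys := by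
      subst hn; simp
    have h2 := ih (pre' ++ [x]) y
      (if (if y = 1 then true else fl) = true ∧ y ≠ x then c + 1 else c)
      (if y = 1 then true else fl) hpre2
    have hlen2 : (((pre' ++ [x]).length : Int)) + 1 = (pre'.length : Int) + 1 + 1 := by
      simp
    rw [hlen2] at h2
    rw [h2]
    simp only [loopA]

theorem solve_eq_loopA (x : Int) (xs : List Int) :
    solve (x :: xs) = loopA xs x (if x = 1 then true else false) (if x = 1 then 1 else 0) := by
  unfold solve
  have hlt : (0 : Int) < ((x :: xs).length : Int) := by simp
  rw [PySem.List.pyRange_one_cons hlt]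
  simp only [List.foldl_cons]
  have hget0 : PySem.List.pyGetD (x :: xs) (0 : Int) 0 = x := by
    have h0 : (0 : Int) = ((0 : Nat) : Int) := rfl
    rw [h0, PySem.List.pyGetD_natCast]; rfl
  have hstep : stepA (x :: xs) (0, false) 0
      = (if x = 1 then 1 else 0, if x = 1 then true else false) := by
    simp only [stepA, hget0]
    by_cases hx : x = 1 <;> simp [hx]
  rw [hstep]
  have h2 := fold_eq_loopA (x :: xs) xs [] x (if x = 1 then 1 else 0)
    (if x = 1 then true else false) (by simp)
  simpa using h2

theorem solve_eq_normForm (nums : List Int) : solve nums = normForm nums := by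
  cases nums with
  | nil => simp [solve, normForm, PySem.List.pyRange_one_eq_nil, PySem.List.index?]
  | cons x xs =>
    rw [solve_eq_loopA]
    unfold normForm
    by_cases hx : x = 1
    · subst hx
      rw [if_pos rfl, if_pos rfl, loopA_true, PySem.List.index?_cons_self]
      simp
    · rw [if_neg hx, if_neg hx, loopA_false xs x 0 hx,
        PySem.List.index?_cons_of_ne xs hx]
      cases PySem.List.index? xs 1 with
      | none => simp
      | some j => simp

-- ===== B-side lemmas =====

-- structural run-length compression relative to a previous element
def rcomp : Int → List Int → List Int
  | _, [] => []
  | prev, x :: xs => if x = prev then rcomp x xs else x :: rcomp x xs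

-- B's fold equals the structural compression
theorem foldB_eq_rcomp (xs : List Int) : ∀ (pre : List Int) (prev : Int),
    (xs.foldl stepB (pre ++ [prev])) = pre ++ prev :: rcomp prev xs := by
  induction xs with
  | nil => intro pre prev; simp [rcomp]
  | cons x xs ih =>
    intro pre prev
    simp only [List.foldl_cons]
    have hlast : PySem.List.pyGetD (pre ++ [prev]) (-1) 0 = prev :=
      PySem.List.pyGetD_neg_one_append_singleton pre prev 0
    by_cases hx : x = prev
    · have : stepB (pre ++ [prev]) x = pre ++ [prev] := by
        simp [stepB, hlast, hx]
      rw [this, ih pre prev]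
      simp [rcomp, hx]
    · have : stepB (pre ++ [prev]) x = (pre ++ [prev]) ++ [x] := by
        simp [stepB, hlast, Ne.symm hx]
      rw [this, show (pre ++ [prev]) ++ [x] = (pre ++ [prev]) ++ [x] from rfl, ih (pre ++ [prev]) x]
      simp [rcomp, hx]

-- size of the compressed tail = number of transitions
theorem rcomp_length (xs : List Int) : ∀ (prev : Int),
    ((rcomp prev xs).length : Int) = transCnt (prev :: xs) := by
  induction xs with
  | nil => intro prev; simp [rcomp, transCnt]
  | cons x xs ih =>
    intro prev
    by_cases hx : x = prev
    · simp only [rcomp, if_pos hx, transCnt]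
      rw [ih x]; simp [hx]
    · simp only [rcomp, if_neg hx, transCnt, List.length_cons]
      rw [if_pos (fun h : prev = x => hx h.symm)]
      push_cast
      rw [ih x]; ring

-- answer phase of B, as a function of the compressed list
def valB (comp : List Int) : Int :=
  if (1 : Int) ∈ comp then
    (comp.length : Int) - (((PySem.List.index? comp 1).getD 0 : Nat) : Int)
  else 0

-- popping a non-1 head does not change B's answer phase
theorem valB_cons_ne (a : Int) (l : List Int) (ha : a ≠ 1) : valB (a :: l) = valB l := by
  unfold valB
  by_cases hm : (1 : Int) ∈ l
  · rw [if_pos (List.mem_cons_of_mem a hm), if_pos hm]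
    rcases (PySem.List.index?_isSome_iff l 1).2 hm |> Option.isSome_iff_exists.1 with ⟨j, hj⟩
    rw [PySem.List.index?_cons_of_ne l ha, hj]
    simp
  · rw [if_neg hm, if_neg (by simp [hm]; exact Ne.symm ha)]

-- B's answer phase on the compressed tail equals the normal form (prev ≠ 1 case)
theorem valB_rcomp (xs : List Int) : ∀ (prev : Int), prev ≠ 1 →
    valB (rcomp prev xs) = normForm xs := by
  induction xs with
  | nil => intro prev _; simp [rcomp, valB, normForm, PySem.List.index?]
  | cons x xs ih =>
    intro prev hprev
    by_cases hx : x = 1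
    · subst hx
      rw [show rcomp prev (1 :: xs) = 1 :: rcomp 1 xs by simp [rcomp, Ne.symm hprev]]
      unfold valB normForm
      rw [if_pos (List.mem_cons_self), PySem.List.index?_cons_self,
          PySem.List.index?_cons_self]
      simp only [Option.getD_some, Nat.cast_zero, sub_zero, List.length_cons, List.drop_zero]
      push_cast
      rw [rcomp_length]; ring
    · have hrhs : normForm (x :: xs) = normForm xs := by
        unfold normForm
        rw [PySem.List.index?_cons_of_ne xs hx]
        cases PySem.List.index? xs 1 with
        | none => simp
        | some j => simp
      rw [hrhs]
      by_cases hpx : x = prev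
      · rw [show rcomp prev (x :: xs) = rcomp x xs by simp [rcomp, hpx]]
        exact ih x (hpx ▸ hprev)
      · rw [show rcomp prev (x :: xs) = x :: rcomp x xs by simp [rcomp, hpx]]
        rw [valB_cons_ne x _ hx]
        exact ih x hx

theorem solve_alt_eq_normForm (nums : List Int) : solve_alt nums = normForm nums := by
  cases nums with
  | nil => simp [solve_alt, normForm, PySem.List.index?]
  | cons x xs =>
    have hfold : (x :: xs).foldl stepB [] = x :: rcomp x xs := by
      have h0 : stepB [] x = [] ++ [x] := by simp [stepB]
      simp only [List.foldl_cons, h0]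
      exact foldB_eq_rcomp xs [] x
    show valB ((x :: xs).foldl stepB []) = normForm (x :: xs)
    rw [hfold]
    by_cases hx : x = 1
    · subst hx
      unfold valB normForm
      rw [if_pos (List.mem_cons_self), PySem.List.index?_cons_self,
          PySem.List.index?_cons_self]
      simp only [Option.getD_some, Nat.cast_zero, sub_zero, List.length_cons, List.drop_zero]
      push_cast
      rw [rcomp_length]
      ring
    · rw [valB_cons_ne x _ hx]
      have hrhs : normForm (x :: xs) = normForm xs := by
        unfold normForm
        rw [PySem.List.index?_cons_of_ne xs hx]
        cases PySem.List.index? xs 1 with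
        | none => simp
        | some j => simp
      rw [hrhs]
      exact valB_rcomp xs x hx

-- ===== VERDICT (by name: the statement is the Claim_ definition above) =====
theorem solve_spec : Claim_equal_solve := by
  intro nums _
  unfold Spec_solve
  rw [solve_eq_normForm, solve_alt_eq_normForm]
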